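-- pv_equiv track=rewrite | github.com/Manta-Epitech-Academy/workshop-metadata-tools | sync_metadata_toc.py | extract_comment_block_before_observables
-- ===== SOURCE A (Python) =====
-- def extract_comment_block_before_observables(text: str) -> str | None:
--     """Return blank and `#` lines directly above top-level `observables:` (ruamel may drop these)."""
--     lines = text.splitlines(keepends=True)
--     obs_idx: int | None = None
--     for i, line in enumerate(lines):
--         if line.startswith("observables:"):
--             obs_idx = i
--             break
--     if obs_idx is None or obs_idx == 0:
--         return None
--     chunk: list[str] = []
--     j = obs_idx - 1
--     while j >= 0:
--         line = lines[j]
--         if line.strip() == "":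
--             chunk.append(line)
--             j -= 1
--             continue
--         if line.lstrip().startswith("#"):
--             chunk.append(line)
--             j -= 1
--             continue
--         break
--     if not any(l.lstrip().startswith("#") for l in chunk):
--         return None
--     chunk.reverse()
--     return "".join(chunk)
-- ===== SOURCE B (Python) =====
-- def extract_comment_block_before_observables(text: str) -> str | None:
--     """Single forward pass: track the start of the current run of blank/comment lines."""
--     lines = text.splitlines(keepends=True)
--     start = 0
--     for i, line in enumerate(lines):
--         if line.startswith("observables:"):
--             block = lines[start:i]
--             if any(l.lstrip().startswith("#") for l in block):
--                 return "".join(block)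
--             return None
--         if line.strip() == "" or line.lstrip().startswith("#"):
--             continue
--         start = i + 1
--     return None
-- ===== Notes on version B (the rewrite author's own statement) =====
-- stated objective: simpler
-- what changed: Replaced A's find-the-observables-line-then-scan-backwards-collecting-a-reversed-chunk with a single forward pass that tracks the start index of the current run of blank/comment lines and slices it out when the observables line is reached.
import Mathlib
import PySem

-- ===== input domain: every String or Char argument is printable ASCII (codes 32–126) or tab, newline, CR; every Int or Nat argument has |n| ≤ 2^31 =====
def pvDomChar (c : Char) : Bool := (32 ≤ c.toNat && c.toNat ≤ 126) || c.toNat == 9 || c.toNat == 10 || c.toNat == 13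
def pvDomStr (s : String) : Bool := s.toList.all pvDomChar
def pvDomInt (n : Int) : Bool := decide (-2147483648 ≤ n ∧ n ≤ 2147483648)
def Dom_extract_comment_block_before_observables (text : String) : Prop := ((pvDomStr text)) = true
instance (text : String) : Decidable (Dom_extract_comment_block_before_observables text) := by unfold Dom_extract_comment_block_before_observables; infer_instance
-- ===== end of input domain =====

-- B does the same task in ONE forward pass (tracking the start of the current blank/comment run)
-- instead of A's find-then-backward-scan; objective: simpler.

-- shared helper: text.splitlines(keepends=True); exact on the domain's line breaks '\n', '\r', '\r\n'
def pvSplitKeepGo : List Char → List Char → List String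
  | [], acc => if acc.isEmpty then [] else [String.ofList acc.reverse]
  | '\r' :: '\n' :: cs, acc => String.ofList (('\n' :: '\r' :: acc).reverse) :: pvSplitKeepGo cs []
  | '\n' :: cs, acc => String.ofList (('\n' :: acc).reverse) :: pvSplitKeepGo cs []
  | '\r' :: cs, acc => String.ofList (('\r' :: acc).reverse) :: pvSplitKeepGo cs []
  | c :: cs, acc => pvSplitKeepGo cs (c :: acc)

def pvSplitKeep (text : String) : List String := pvSplitKeepGo text.toList []

-- ===== PORT A =====

-- first index i with lines[i].startswith("observables:")
def pvFindObs : List String → Nat → Option Nat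
  | [], _ => none
  | l :: ls, i => if PySem.Str.startswith l "observables:" then some i else pvFindObs ls (i + 1)

-- A's backward while-loop: j counts down from obs_idx-1, chunk accumulates by append
def pvBack (lines : List String) : Nat → List String → List String
  | j, chunk =>
    let line := (PySem.List.pyGet? lines (j : Int)).getD ""
    if PySem.Str.strip line == "" then
      (if j = 0 then chunk ++ [line] else pvBack lines (j - 1) (chunk ++ [line]))
    else if PySem.Str.startswith (PySem.Str.lstrip line) "#" then
      (if j = 0 then chunk ++ [line] else pvBack lines (j - 1) (chunk ++ [line]))
    else chunk

def extract_comment_block_before_observables (text : String) : Option String :=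
  let lines := pvSplitKeep text
  match pvFindObs lines 0 with
  | none => none
  | some obs_idx =>
    if obs_idx = 0 then none
    else
      let chunk := pvBack lines (obs_idx - 1) []
      if ¬ (chunk.any (fun l => PySem.Str.startswith (PySem.Str.lstrip l) "#")) then none
      else some (PySem.Str.join "" chunk.reverse)

-- ===== PORT B =====

-- B's single forward pass: i is the current index, start the start of the current blank/comment run
def pvAltGo (all : List String) : List String → Nat → Nat → Option String
  | [], _, _ => none
  | line :: rest, i, start =>
    if PySem.Str.startswith line "observables:" then
      let block := PySem.List.slice all (some (start : Int)) (some (i : Int))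
      if block.any (fun l => PySem.Str.startswith (PySem.Str.lstrip l) "#") then
        some (PySem.Str.join "" block)
      else none
    else if PySem.Str.strip line == "" || PySem.Str.startswith (PySem.Str.lstrip line) "#" then
      pvAltGo all rest (i + 1) start
    else
      pvAltGo all rest (i + 1) (i + 1)

def extract_comment_block_before_observables_alt (text : String) : Option String :=
  let lines := pvSplitKeep text
  pvAltGo lines lines 0 0

-- ===== PRECONDITION & SPEC =====
def Spec_extract_comment_block_before_observables (text : String) (out : Option String) : Prop := out = extract_comment_block_before_observables_alt text
instance (text : String) (out : Option String) : Decidable (Spec_extract_comment_block_before_observables text out) := by unfold Spec_extract_comment_block_before_observables; infer_instance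

-- ===== CLAIM (what is proved, stated in full; the proofs are below) =====
def Claim_equal_extract_comment_block_before_observables : Prop := ∀ (text : String), Dom_extract_comment_block_before_observables text → Spec_extract_comment_block_before_observables text (extract_comment_block_before_observables text)

-- ===== LEMMAS AND PROOFS =====

-- abbreviations used only by the proofs
def pvObs (l : String) : Bool := PySem.Str.startswith l "observables:"
def pvP (l : String) : Bool := PySem.Str.strip l == "" || PySem.Str.startswith (PySem.Str.lstrip l) "#"
def pvC (l : String) : Bool := PySem.Str.startswith (PySem.Str.lstrip l) "#"
def pvStep (run : List String) (l : String) : List String := if pvP l then run ++ [l] else []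
def pvHandle (block : List String) : Option String :=
  if block.any pvC then some (PySem.Str.join "" block) else none

theorem pvFindObs_none {lines : List String} {k : Nat}
    (h : pvFindObs lines k = none) : ∀ l ∈ lines, pvObs l = false := by
  induction lines generalizing k with
  | nil => intro l hl; cases hl
  | cons a ls ih =>
    rw [pvFindObs] at h
    split at h
    · exact absurd h (by simp)
    · rename_i ha
      intro l hl
      rcases List.mem_cons.mp hl with rfl | hl
      · simpa [pvObs] using ha
      · exact ih h l hl

theorem pvFindObs_some {lines : List String} {k i : Nat}
    (h : pvFindObs lines k = some i) :
    ∃ pre l₀ rest, lines = pre ++ l₀ :: rest ∧ i = k + pre.length ∧ pvObs l₀ = true ∧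
      ∀ l ∈ pre, pvObs l = false := by
  induction lines generalizing k with
  | nil => simp [pvFindObs] at h
  | cons a ls ih =>
    rw [pvFindObs] at h
    split at h
    · rename_i ha
      refine ⟨[], a, ls, by simp, ?_, by simpa [pvObs] using ha, by simp⟩
      simp only [List.length_nil] ; simp at h; omega
    · rename_i ha
      obtain ⟨pre, l₀, rest, h1, h2, h3, h4⟩ := ih h
      refine ⟨a :: pre, l₀, rest, by simp [h1], by simp; omega, h3, ?_⟩
      intro l hl
      rcases List.mem_cons.mp hl with rfl | hl
      · simpa [pvObs] using ha
      · exact h4 l hl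

theorem pvBack_append (pre tail : List String) (j : Nat) (chunk : List String)
    (hj : j < pre.length) : pvBack (pre ++ tail) j chunk = pvBack pre j chunk := by
  induction j generalizing chunk with
  | zero =>
    conv_lhs => rw [pvBack]
    conv_rhs => rw [pvBack]
    have h1 : PySem.List.pyGet? (pre ++ tail) ((0:Nat):Int) = pre[0]? := by
      rw [PySem.List.pyGet?_natCast, List.getElem?_append_left hj]
    have h2 : PySem.List.pyGet? pre ((0:Nat):Int) = pre[0]? := PySem.List.pyGet?_natCast pre 0
    rw [h1, h2]
    simp
  | succ j ih =>
    conv_lhs => rw [pvBack]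
    conv_rhs => rw [pvBack]
    simp only [PySem.List.pyGet?_natCast, List.getElem?_append_left hj]
    simp only [Nat.add_sub_cancel]
    split_ifs <;> first | rfl | exact ih _ (by omega)

theorem pvBack_spec (pre : List String) (chunk : List String) (h : pre ≠ []) :
    pvBack pre (pre.length - 1) chunk = chunk ++ (pre.foldl pvStep []).reverse := by
  induction pre using List.reverseRecOn generalizing chunk with
  | nil => simp at h
  | append_singleton qs l ih =>
    conv_lhs => rw [pvBack]
    rw [List.foldl_concat]
    have hlen : (qs ++ [l]).length - 1 = qs.length := by simp
    have hget : (PySem.List.pyGet? (qs ++ [l]) (((qs ++ [l]).length - 1 : Nat) : Int)).getD "" = l := by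
      rw [hlen, PySem.List.pyGet?_natCast]
      simp
    simp only [hget]
    have hbranch : (if (qs ++ [l]).length - 1 = 0 then chunk ++ [l]
          else pvBack (qs ++ [l]) ((qs ++ [l]).length - 1 - 1) (chunk ++ [l]))
          = chunk ++ [l] ++ (qs.foldl pvStep []).reverse := by
      rcases eq_or_ne qs [] with rfl | hqs
      · simp
      · have hq : 0 < qs.length := List.length_pos_iff.mpr hqs
        rw [if_neg (by simp; omega), hlen]
        rw [pvBack_append qs [l] (qs.length - 1) _ (by omega)]
        exact ih (chunk ++ [l]) hqs
    by_cases hP : pvP l = true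
    · have hres : chunk ++ [l] ++ (qs.foldl pvStep []).reverse
          = chunk ++ (pvStep (qs.foldl pvStep []) l).reverse := by
        simp [pvStep, hP]
      rcases Bool.or_eq_true _ _ |>.mp hP with h1 | h2
      · rw [if_pos h1, hbranch, hres]
      · by_cases h1 : (PySem.Str.strip l == "") = true
        · rw [if_pos h1, hbranch, hres]
        · rw [if_neg h1, if_pos h2, hbranch, hres]
    · have hP0 : pvP l = false := Bool.eq_false_iff.mpr hP
      unfold pvP at hP0
      obtain ⟨h1, h2⟩ := Bool.or_eq_false_iff.mp hP0
      rw [if_neg (by rw [h1]; simp), if_neg (by rw [h2]; simp)]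
      simp at h2
      simp [pvStep, pvP, h1, h2]

theorem pvAltGo_none (all : List String) (rest : List String) (i start : Nat)
    (h : ∀ l ∈ rest, pvObs l = false) : pvAltGo all rest i start = none := by
  induction rest generalizing i start with
  | nil => rfl
  | cons a ls ih =>
    have ha : pvObs a = false := h a (by simp)
    rw [pvAltGo, if_neg (by rw [pvObs] at ha; rw [ha]; simp)]
    split_ifs <;> exact ih _ _ (fun l hl => h l (List.mem_cons_of_mem _ hl))

theorem pvAltGo_main (all : List String) (pre : List String) (l₀ : String) (rest : List String)
    (hpre : ∀ l ∈ pre, pvObs l = false) (hl₀ : pvObs l₀ = true) :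
    ∀ pre₀ start run, all = pre₀ ++ (pre ++ l₀ :: rest) → start ≤ pre₀.length →
      pre₀.drop start = run →
      pvAltGo all (pre ++ l₀ :: rest) pre₀.length start = pvHandle (pre.foldl pvStep run) := by
  induction pre generalizing all with
  | nil =>
    intro pre₀ start run hall hstart hrun
    simp only [List.nil_append, List.foldl_nil]
    rw [pvAltGo, if_pos (by rw [pvObs] at hl₀; rw [hl₀])]
    have hblock : PySem.List.slice all (some ((start : Nat) : Int)) (some ((pre₀.length : Nat) : Int))
        = pre₀.drop start := by
      rw [PySem.List.slice_natCast, hall, List.drop_append_of_le_length hstart]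
      exact List.take_left' (by simp)
    simp only [hblock, hrun]
    rfl
  | cons a pre' ih =>
    intro pre₀ start run hall hstart hrun
    have ha : pvObs a = false := hpre a (by simp)
    rw [List.cons_append, pvAltGo, if_neg (by rw [pvObs] at ha; rw [ha]; simp)]
    have htake : (pre₀ ++ [a]).length = pre₀.length + 1 := by simp
    by_cases hP : (PySem.Str.strip a == "" || PySem.Str.startswith (PySem.Str.lstrip a) "#") = true
    · rw [if_pos hP]
      have hrec := ih all (fun l hl => hpre l (List.mem_cons_of_mem _ hl)) (pre₀ ++ [a]) start (run ++ [a])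
        (by simp [hall]) (by rw [htake]; omega)
        (by rw [List.drop_append_of_le_length hstart, hrun])
      rw [htake] at hrec
      rw [hrec]
      have hstep : pvStep run a = run ++ [a] := by rw [pvStep, if_pos (by rw [pvP]; exact hP)]
      rw [List.foldl_cons, hstep]
    · rw [if_neg hP]
      have hrec := ih all (fun l hl => hpre l (List.mem_cons_of_mem _ hl)) (pre₀ ++ [a]) (pre₀.length + 1) []
        (by simp [hall]) (by rw [htake]) (by apply List.drop_eq_nil_of_le; simp)
      rw [htake] at hrec
      rw [hrec]
      have hstep : pvStep run a = [] := by rw [pvStep, if_neg (by rw [pvP]; exact hP)]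
      rw [List.foldl_cons, hstep]

-- ===== VERDICT (by name: the statement is the Claim_ definition above) =====
theorem extract_comment_block_before_observables_spec : Claim_equal_extract_comment_block_before_observables := by
  intro text _
  show extract_comment_block_before_observables text = extract_comment_block_before_observables_alt text
  simp only [extract_comment_block_before_observables, extract_comment_block_before_observables_alt]
  generalize pvSplitKeep text = L
  cases hfind : pvFindObs L 0 with
  | none => exact (pvAltGo_none _ _ 0 0 (pvFindObs_none hfind)).symm
  | some i =>
    obtain ⟨pre, l₀, rest, h1, h2, h3, h4⟩ := pvFindObs_some hfind
    subst h1
    simp only [Nat.zero_add] at h2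
    have hmain := pvAltGo_main (pre ++ l₀ :: rest) pre l₀ rest h4 h3 [] 0 [] (by simp) (by simp) (by simp)
    simp only [List.length_nil] at hmain
    rw [hmain]
    show (if i = 0 then none
      else if ¬((pvBack (pre ++ l₀ :: rest) (i - 1) []).any fun l =>
          PySem.Str.startswith (PySem.Str.lstrip l) "#") = true then none
      else some (PySem.Str.join "" (pvBack (pre ++ l₀ :: rest) (i - 1) []).reverse))
      = pvHandle (pre.foldl pvStep [])
    by_cases hi : i = 0
    · rw [if_pos hi]
      have hpre : pre = [] := by simpa using h2.symm.trans hi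
      subst hpre
      simp [pvHandle]
    · rw [if_neg hi]
      have hpre : pre ≠ [] := by
        intro hc; subst hc; simp at h2; omega
      have hchunk : pvBack (pre ++ l₀ :: rest) (i - 1) [] = (pre.foldl pvStep []).reverse := by
        rw [pvBack_append pre (l₀ :: rest) (i - 1) []
          (by have := List.length_pos_iff.mpr hpre; omega)]
        rw [show i - 1 = pre.length - 1 by omega]
        simpa using pvBack_spec pre [] hpre
      rw [hchunk]
      have hany : ((pre.foldl pvStep []).reverse.any
          (fun l => PySem.Str.startswith (PySem.Str.lstrip l) "#"))
          = (pre.foldl pvStep []).any pvC := by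
        rw [List.any_reverse]; rfl
      rw [pvHandle, hany, List.reverse_reverse]
      split_ifs <;> simp_all
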